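-- pv_equiv track=rewrite | github.com/Mr-nagabhushana-at-Git-hub/NYERAS | phase1_retail_insights.py | make_unique_labels
-- ===== SOURCE A (Python) =====
-- def make_unique_labels(labels: list[str]) -> list[str]:
--     seen: dict[str, int] = {}
--     unique_labels: list[str] = []
--     for label in labels:
--         base = label or "column"
--         count = seen.get(base, 0)
--         unique_labels.append(base if count == 0 else f"{base}_{count + 1}")
--         seen[base] = count + 1
--     return unique_labels
-- ===== SOURCE B (Python) =====
-- def make_unique_labels(labels: list[str]) -> list[str]:
--     # Bucket-by-base: one pass groups the positions of every base, then each
--     # bucket is numbered independently and written back at the original positions.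
--     positions: dict[str, list[int]] = {}
--     for i, label in enumerate(labels):
--         positions.setdefault(label or "column", []).append(i)
--     out = [""] * len(labels)
--     for base, idxs in positions.items():
--         for k, i in enumerate(idxs):
--             out[i] = base if k == 0 else f"{base}_{k + 1}"
--     return out
-- ===== Notes on version B (the rewrite author's own statement) =====
-- stated objective: alternative
-- what changed: Replaces the single streaming pass with a running seen-counter dict by a two-phase bucket scheme: first group the positions of each base into an index, then number each bucket independently (bare, _2, _3, ...) and write the results back at the original positions.
import Mathlib
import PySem

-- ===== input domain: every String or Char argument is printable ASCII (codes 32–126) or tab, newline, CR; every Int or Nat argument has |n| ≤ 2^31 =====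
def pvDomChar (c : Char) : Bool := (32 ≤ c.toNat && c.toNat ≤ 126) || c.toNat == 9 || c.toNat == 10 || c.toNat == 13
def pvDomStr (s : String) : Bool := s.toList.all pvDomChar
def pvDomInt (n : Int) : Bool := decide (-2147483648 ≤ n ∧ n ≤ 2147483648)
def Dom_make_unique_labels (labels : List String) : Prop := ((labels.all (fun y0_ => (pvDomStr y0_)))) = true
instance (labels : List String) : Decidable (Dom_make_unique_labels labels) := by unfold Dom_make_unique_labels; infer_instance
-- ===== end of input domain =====

-- B replaces A's streaming seen-counter pass by a two-phase bucket scheme (group positions per base, then number each bucket); alternative decomposition, same results.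


-- ===== PORT A =====
def make_unique_labels (labels : List String) : List String :=
  (labels.foldl (fun (st : PySem.Dict String Int × List String) label =>
      let base := if label = "" then "column" else label
      let count := st.1.getD base 0
      (st.1.insert base (count + 1),
       st.2 ++ [if count = 0 then base else base ++ "_" ++ PySem.Int.toStr (count + 1)])
    ) (PySem.Dict.empty, [])).2

-- ===== PORT B =====
-- positions.setdefault(base, []).append(i) appends i to the bucket kept at its key:
-- modeled as insert base (getD base [] ++ [i]) (overwrite keeps the key's position).
-- Every index written by out[i] = … comes from enumerate(labels), so 0 ≤ i < len(out):
-- List.set i.toNat is exact there.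
def make_unique_labels_alt (labels : List String) : List String :=
  let positions := (PySem.List.enumerate labels).foldl
    (fun (d : PySem.Dict String (List Int)) p =>
      let base := if p.2 = "" then "column" else p.2
      d.insert base (d.getD base [] ++ [p.1]))
    PySem.Dict.empty
  positions.items.foldl
    (fun out kv =>
      (PySem.List.enumerate kv.2).foldl
        (fun out q =>
          out.set q.2.toNat
            (if q.1 = 0 then kv.1 else kv.1 ++ "_" ++ PySem.Int.toStr (q.1 + 1)))
        out)
    (List.replicate labels.length "")

-- ===== PRECONDITION & SPEC =====
def Spec_make_unique_labels (labels : List String) (out : List String) : Prop := out = make_unique_labels_alt labels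
instance (labels : List String) (out : List String) : Decidable (Spec_make_unique_labels labels out) := by unfold Spec_make_unique_labels; infer_instance

-- ===== CLAIM (what is proved, stated in full; the proofs are below) =====
def Claim_equal_make_unique_labels : Prop := ∀ (labels : List String), Dom_make_unique_labels labels → Spec_make_unique_labels labels (make_unique_labels labels)

-- ===== LEMMAS AND PROOFS =====

-- the "base" normalization (label or "column")
def pvNorm (l : String) : String := if l = "" then "column" else l

-- the label emitted for the (k+1)-th occurrence of base b
def pvRender (b : String) (k : Nat) : String :=
  if k = 0 then b else b ++ "_" ++ PySem.Int.toStr ((k : Nat) + 1)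

-- intended output at position j, for the normalized list `bases`
def pvSpec (bases : List String) (j : Nat) (h : j < bases.length) : String :=
  pvRender bases[j] ((bases.take j).count bases[j])

-- reference form of A's output: suffix `suf` of normalized bases given already-seen prefix `pre`
def pvSpecGo (pre : List String) : List String → List String
  | [] => []
  | b :: rest => pvRender b (pre.count b) :: pvSpecGo (pre ++ [b]) rest

-- positions (as Int) at which `labels` (enumerated from s) has base b, in order
def pvIdxs (labels : List String) (s : Int) (b : String) : List Int :=
  ((PySem.List.enumerate labels s).filter (fun p => pvNorm p.2 == b)).map (·.1)

theorem pvA_go (suf : List String) : ∀ (pre : List String) (seen : PySem.Dict String Int)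
    (acc : List String),
    (∀ b, seen.getD b 0 = (pre.count b : Int)) →
    (suf.foldl (fun (st : PySem.Dict String Int × List String) label =>
      let base := if label = "" then "column" else label
      let count := st.1.getD base 0
      (st.1.insert base (count + 1),
       st.2 ++ [if count = 0 then base else base ++ "_" ++ PySem.Int.toStr (count + 1)])
    ) (seen, acc)).2
      = acc ++ pvSpecGo pre (suf.map pvNorm) := by
  induction suf with
  | nil => intro pre seen acc h; simp [pvSpecGo]
  | cons l rest ih =>
    intro pre seen acc h
    simp only [List.foldl_cons, List.map_cons, pvSpecGo]
    have hn : (if l = "" then "column" else l) = pvNorm l := rfl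
    rw [hn, ih (pre ++ [pvNorm l])]
    · rw [h]
      by_cases hc : pre.count (pvNorm l) = 0 <;>
        simp [hc, pvRender, List.append_assoc]
    · intro b
      rw [PySem.Dict.getD_insert]
      by_cases hb : b = pvNorm l
      · subst hb
        simp [h, List.count_append]
      · simp only [if_neg hb]
        have hc : List.count b (pre ++ [pvNorm l]) = List.count b pre := by
          simp [List.count_append, (Ne.symm (hb : b ≠ pvNorm l) : pvNorm l ≠ b)]
        rw [hc]; exact h b

theorem pvSpecGo_length (suf : List String) : ∀ pre, (pvSpecGo pre suf).length = suf.length := by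
  induction suf with
  | nil => intro pre; simp [pvSpecGo]
  | cons b rest ih => intro pre; simp [pvSpecGo, ih]

theorem pvSpecGo_getElem (suf : List String) : ∀ (pre : List String) (j : Nat)
    (h : j < suf.length) (h' : j < (pvSpecGo pre suf).length),
    (pvSpecGo pre suf)[j] = pvRender suf[j] ((pre ++ suf.take j).count suf[j]) := by
  induction suf with
  | nil => intro pre j h h'; simp at h
  | cons b rest ih =>
    intro pre j h h'
    cases j with
    | zero => simp [pvSpecGo]
    | succ j =>
      have hr : j < rest.length := by simpa using h
      have hr' : j < (pvSpecGo (pre ++ [b]) rest).length := by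
        rw [pvSpecGo_length]; exact hr
      simp only [pvSpecGo, List.getElem_cons_succ, List.take_succ_cons]
      rw [ih (pre ++ [b]) j hr hr']
      simp [List.append_assoc]

-- bucket contents of the grouping fold
theorem pvBucket_getD (l : List (Int × String)) : ∀ (d : PySem.Dict String (List Int)) (b : String),
    (l.foldl (fun (d : PySem.Dict String (List Int)) p =>
        d.insert (if p.2 = "" then "column" else p.2)
          (d.getD (if p.2 = "" then "column" else p.2) [] ++ [p.1])) d).getD b []
      = d.getD b [] ++ (l.filter (fun p => pvNorm p.2 == b)).map (·.1) := by
  induction l with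
  | nil => intro d b; simp
  | cons p rest ih =>
    intro d b
    simp only [List.foldl_cons, List.filter_cons]
    rw [ih]
    have hn : (if p.2 = "" then "column" else p.2) = pvNorm p.2 := rfl
    rw [hn, PySem.Dict.getD_insert]
    by_cases hb : b = pvNorm p.2
    · simp [hb]
    · have hb' : pvNorm p.2 ≠ b := fun hx => hb hx.symm
      simp [hb, hb']

theorem pvBucket_nodup (l : List (Int × String)) : ∀ (d : PySem.Dict String (List Int)),
    d.keys.Nodup →
    (l.foldl (fun (d : PySem.Dict String (List Int)) p =>
        d.insert (if p.2 = "" then "column" else p.2)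
          (d.getD (if p.2 = "" then "column" else p.2) [] ++ [p.1])) d).keys.Nodup := by
  induction l with
  | nil => intro d h; exact h
  | cons p rest ih =>
    intro d h
    exact ih _ (PySem.Dict.nodup_keys_insert _ _ _ h)

theorem pvBucket_mem_keys (l : List (Int × String)) : ∀ (d : PySem.Dict String (List Int)) (b : String),
    (b ∈ (l.foldl (fun (d : PySem.Dict String (List Int)) p =>
        d.insert (if p.2 = "" then "column" else p.2)
          (d.getD (if p.2 = "" then "column" else p.2) [] ++ [p.1])) d).keys
      ↔ b ∈ d.keys ∨ b ∈ l.map (fun p => pvNorm p.2)) := by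
  induction l with
  | nil => intro d b; simp
  | cons p rest ih =>
    intro d b
    simp only [List.foldl_cons, List.map_cons, List.mem_cons]
    rw [ih]
    have hn : (if p.2 = "" then "column" else p.2) = pvNorm p.2 := rfl
    rw [hn, PySem.Dict.mem_keys_insert]
    tauto

-- the k-th position in the bucket of b is the index of the (k+1)-th occurrence of b
theorem pvIdxs_occ (labels : List String) : ∀ (s : Nat) (b : String) (k : Nat)
    (hk : k < (pvIdxs labels (s : Int) b).length),
    ∃ (j : Nat) (hj : j < labels.length),
      (pvIdxs labels (s : Int) b)[k]? = some ((s + j : Nat) : Int) ∧ pvNorm labels[j] = b ∧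
      ((labels.take j).map pvNorm).count b = k := by
  induction labels with
  | nil => intro s b k hk; simp [pvIdxs, PySem.List.enumerate_nil] at hk
  | cons l rest ih =>
    intro s b k hk
    have hc1 : ((s : Int) + 1) = (((s + 1 : Nat)) : Int) := by push_cast; ring
    by_cases hb : pvNorm l = b
    · have he : pvIdxs (l :: rest) (s : Int) b = (s : Int) :: pvIdxs rest (((s + 1 : Nat)) : Int) b := by
        rw [← hc1]
        simp [pvIdxs, PySem.List.enumerate_cons, hb]
      cases k with
      | zero =>
        refine ⟨0, by simp, ?_, by simpa using hb, by simp⟩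
        rw [he]; simp
      | succ k =>
        have hk' : k < (pvIdxs rest (((s + 1 : Nat)) : Int) b).length := by
          rw [he] at hk; simpa using hk
        obtain ⟨j, hj, hidx, hnorm, hcount⟩ := ih (s + 1) b k hk'
        refine ⟨j + 1, by simpa using Nat.succ_lt_succ hj, ?_, by simpa using hnorm, ?_⟩
        · rw [he, List.getElem?_cons_succ, hidx]
          congr 1; omega
        · simp [hb, - List.map_take, ← List.map_take, hcount]
    · have he : pvIdxs (l :: rest) (s : Int) b = pvIdxs rest (((s + 1 : Nat)) : Int) b := by
        rw [← hc1]
        simp [pvIdxs, PySem.List.enumerate_cons, hb]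
      rw [he] at hk
      obtain ⟨j, hj, hidx, hnorm, hcount⟩ := ih (s + 1) b k hk
      refine ⟨j + 1, by simpa using Nat.succ_lt_succ hj, ?_, by simpa using hnorm, ?_⟩
      · rw [he, hidx]
        congr 1; omega
      · simp [hb, - List.map_take, ← List.map_take, hcount]

-- membership: every position of base b is in b's bucket
theorem pvIdxs_mem (labels : List String) (b : String) (i : Nat) (hi : i < labels.length)
    (hb : pvNorm labels[i] = b) : (i : Int) ∈ pvIdxs labels 0 b := by
  unfold pvIdxs
  refine List.mem_map.mpr ⟨((i : Int), labels[i]), ?_, rfl⟩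
  refine List.mem_filter.mpr ⟨?_, by simp [hb]⟩
  exact (PySem.List.mem_enumerate_iff _ _ _).mpr ⟨i, hi, by simp⟩

-- inner fill: writing one bucket
theorem pvFill_one (spec : Nat → String) (val : Int → String) (idxs : List Int) :
    ∀ (s : Nat) (out : List String),
    (∀ (k : Nat) (hk : k < idxs.length),
      ∃ (j : Nat), j < out.length ∧ idxs[k] = (j : Int) ∧ val ((s : Int) + k) = spec j) →
    ((PySem.List.enumerate idxs (s : Int)).foldl
        (fun o q => o.set q.2.toNat (val q.1)) out).length = out.length ∧
    ∀ (i : Nat) (hi : i < out.length),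
      ((PySem.List.enumerate idxs (s : Int)).foldl
        (fun o q => o.set q.2.toNat (val q.1)) out)[i]?
        = some (if (i : Int) ∈ idxs then spec i else out[i]) := by
  induction idxs with
  | nil =>
    intro s out _
    refine ⟨by simp [PySem.List.enumerate_nil], ?_⟩
    intro i hi
    simp [PySem.List.enumerate_nil, List.getElem?_eq_getElem hi]
  | cons i0 rest ih =>
    intro s out H
    obtain ⟨j0, hj0, hidx0, hval0⟩ := H 0 (by simp)
    have hcast : ((s : Int) + 1) = (((s + 1 : Nat)) : Int) := by push_cast; ring
    have hstep : (PySem.List.enumerate (i0 :: rest) (s : Int)).foldl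
        (fun o q => o.set q.2.toNat (val q.1)) out
        = (PySem.List.enumerate rest (((s + 1 : Nat)) : Int)).foldl
            (fun o q => o.set q.2.toNat (val q.1))
            (out.set i0.toNat (val (s : Int))) := by
      rw [PySem.List.enumerate_cons, hcast]; rfl
    have hlen1 : (out.set i0.toNat (val (s : Int))).length = out.length := by simp
    have H' : ∀ (k : Nat) (hk : k < rest.length),
        ∃ (j : Nat), j < (out.set i0.toNat (val (s : Int))).length ∧
          rest[k] = (j : Int) ∧ val (((s + 1 : Nat) : Int) + k) = spec j := by
      intro k hk
      obtain ⟨j, hj, hidx, hval⟩ := H (k + 1) (by simpa using Nat.succ_lt_succ hk)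
      refine ⟨j, by simpa [hlen1] using hj, by simpa using hidx, ?_⟩
      rw [← hval]; congr 1; push_cast; ring
    obtain ⟨ihlen, ihget⟩ := ih (s + 1) (out.set i0.toNat (val (s : Int))) H'
    constructor
    · rw [hstep, ihlen, hlen1]
    · intro i hi
      rw [hstep]
      have hi2 : i < (out.set i0.toNat (val (s : Int))).length := by
        simpa [hlen1] using hi
      rw [ihget i hi2]
      have hidx0' : i0 = ((j0 : Nat) : Int) := by simpa using hidx0
      have hval0' : val (s : Int) = spec j0 := by simpa using hval0
      have hset : (out.set i0.toNat (val (s : Int)))[i]'hi2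
          = if (i : Int) = i0 then spec i else out[i] := by
        simp only [List.getElem_set]
        by_cases hii : (i : Int) = i0
        · have hji : j0 = i := by
            have : (j0 : Int) = (i : Int) := by rw [← hidx0', hii]
            exact_mod_cast this
          have hnat : i0.toNat = i := by simp [← hii]
          simp [hnat, hii, ← hji, hval0']
          intro hcon
          exact absurd hidx0'.symm hcon
        · have h0 : (0 : Int) ≤ i0 := by rw [hidx0']; positivity
          have hne : i0.toNat ≠ i := by intro hgg; exact hii (by omega)
          simp [hne, hii]
      congr 1
      rw [hset]
      by_cases hmem : (i : Int) ∈ rest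
      · simp [hmem]
      · by_cases hii : (i : Int) = i0 <;> simp [hii, hmem]

-- outer fill: writing all buckets
theorem pvFill_all (spec : Nat → String) (its : List (String × List Int)) :
    ∀ (out : List String),
    (∀ e ∈ its, ∀ (k : Nat) (hk : k < e.2.length),
      ∃ (j : Nat), j < out.length ∧ e.2[k] = (j : Int) ∧
        (if (k : Int) = 0 then e.1 else e.1 ++ "_" ++ PySem.Int.toStr ((k : Int) + 1)) = spec j) →
    (its.foldl (fun out kv => (PySem.List.enumerate kv.2).foldl
        (fun o q => o.set q.2.toNat
          (if q.1 = 0 then kv.1 else kv.1 ++ "_" ++ PySem.Int.toStr (q.1 + 1))) out) out).length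
      = out.length ∧
    ∀ (i : Nat) (hi : i < out.length),
      (its.foldl (fun out kv => (PySem.List.enumerate kv.2).foldl
        (fun o q => o.set q.2.toNat
          (if q.1 = 0 then kv.1 else kv.1 ++ "_" ++ PySem.Int.toStr (q.1 + 1))) out) out)[i]?
        = some (if (∃ e ∈ its, (i : Int) ∈ e.2) then spec i else out[i]) := by
  induction its with
  | nil =>
    intro out _
    refine ⟨rfl, ?_⟩
    intro i hi
    simp [List.getElem?_eq_getElem hi]
  | cons e rest ih =>
    intro out H
    have He := H e (by simp)
    have H1 : ∀ (k : Nat) (hk : k < e.2.length),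
        ∃ (j : Nat), j < out.length ∧ e.2[k] = (j : Int) ∧
          (fun (t : Int) => if t = 0 then e.1 else e.1 ++ "_" ++ PySem.Int.toStr (t + 1))
            (((0 : Nat) : Int) + k) = spec j := by
      intro k hk
      obtain ⟨j, hj, hidx, hval⟩ := He k hk
      exact ⟨j, hj, hidx, by simpa using hval⟩
    obtain ⟨len1, get1⟩ := pvFill_one spec
      (fun t => if t = 0 then e.1 else e.1 ++ "_" ++ PySem.Int.toStr (t + 1)) e.2 0 out H1
    set out1 := (PySem.List.enumerate e.2 (((0 : Nat)) : Int)).foldl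
      (fun o q => o.set q.2.toNat
        (if q.1 = 0 then e.1 else e.1 ++ "_" ++ PySem.Int.toStr (q.1 + 1))) out with hout1
    have hstep : (e :: rest).foldl (fun out kv => (PySem.List.enumerate kv.2).foldl
        (fun o q => o.set q.2.toNat
          (if q.1 = 0 then kv.1 else kv.1 ++ "_" ++ PySem.Int.toStr (q.1 + 1))) out) out
        = rest.foldl (fun out kv => (PySem.List.enumerate kv.2).foldl
        (fun o q => o.set q.2.toNat
          (if q.1 = 0 then kv.1 else kv.1 ++ "_" ++ PySem.Int.toStr (q.1 + 1))) out) out1 := rfl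
    have H2 : ∀ e' ∈ rest, ∀ (k : Nat) (hk : k < e'.2.length),
        ∃ (j : Nat), j < out1.length ∧ e'.2[k] = (j : Int) ∧
          (if (k : Int) = 0 then e'.1 else e'.1 ++ "_" ++ PySem.Int.toStr ((k : Int) + 1)) = spec j := by
      intro e' he' k hk
      obtain ⟨j, hj, hidx, hval⟩ := H e' (by simp [he']) k hk
      exact ⟨j, by rw [len1]; exact hj, hidx, hval⟩
    obtain ⟨ihlen, ihget⟩ := ih out1 H2
    constructor
    · rw [hstep, ihlen, len1]
    · intro i hi
      rw [hstep]
      have hi1 : i < out1.length := by rw [len1]; exact hi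
      rw [ihget i hi1]
      have hone := get1 i hi
      have hval1 : out1[i] = if (i : Int) ∈ e.2 then spec i else out[i] := by
        have := List.getElem?_eq_getElem hi1
        rw [this] at hone
        exact Option.some.inj hone
      congr 1
      rw [hval1]
      by_cases hr : ∃ e' ∈ rest, (i : Int) ∈ e'.2
      · have : ∃ e' ∈ e :: rest, (i : Int) ∈ e'.2 := by
          obtain ⟨e', he', hm⟩ := hr; exact ⟨e', by simp [he'], hm⟩
        simp [hr, this]
      · by_cases he : (i : Int) ∈ e.2
        · have : ∃ e' ∈ e :: rest, (i : Int) ∈ e'.2 := ⟨e, by simp, he⟩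
          simp [hr, he, this]
        · have : ¬ ∃ e' ∈ e :: rest, (i : Int) ∈ e'.2 := by
            rintro ⟨e', he', hm⟩
            rcases List.mem_cons.mp he' with rfl | hmem
            · exact he hm
            · exact hr ⟨e', hmem, hm⟩
          simp [hr, he, this]

-- ===== VERDICT (by name: the statement is the Claim_ definition above) =====
theorem make_unique_labels_spec : Claim_equal_make_unique_labels := by
  intro labels _
  show make_unique_labels labels = make_unique_labels_alt labels
  have hA : make_unique_labels labels = pvSpecGo [] (labels.map pvNorm) := by
    unfold make_unique_labels
    rw [pvA_go labels [] PySem.Dict.empty [] (by intro b; simp [PySem.Dict.getD_empty])]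
    simp
  set bases := labels.map pvNorm with hbases
  set d := (PySem.List.enumerate labels).foldl
    (fun (d : PySem.Dict String (List Int)) p =>
      d.insert (if p.2 = "" then "column" else p.2)
        (d.getD (if p.2 = "" then "column" else p.2) [] ++ [p.1]))
    PySem.Dict.empty with hd
  have hnodup : d.keys.Nodup := pvBucket_nodup _ _ PySem.Dict.nodup_keys_empty
  have hgetD : ∀ b, d.getD b [] = pvIdxs labels 0 b := by
    intro b
    rw [hd, pvBucket_getD]
    simp [pvIdxs, PySem.Dict.getD_empty]
  have hitems : d.items = d.keys.map (fun k => (k, d.getD k [])) :=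
    PySem.Dict.items_eq_map_keys d hnodup []
  have hspec0 : ∀ e ∈ d.items, ∀ (k : Nat) (hk : k < e.2.length),
      ∃ (j : Nat), j < (List.replicate labels.length "").length ∧ e.2[k] = (j : Int) ∧
        (if (k : Int) = 0 then e.1 else e.1 ++ "_" ++ PySem.Int.toStr ((k : Int) + 1))
          = (fun i => if h : i < bases.length then pvSpec bases i h else "") j := by
    intro e he k hk
    rw [hitems] at he
    obtain ⟨b, _, rfl⟩ := List.mem_map.mp he
    simp only at hk ⊢
    have hk2 : k < (pvIdxs labels ((0 : Nat) : Int) b).length := by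
      have := hk; rw [hgetD b] at this; exact this
    obtain ⟨j, hj, hidx?, hnorm, hcount⟩ := pvIdxs_occ labels 0 b k hk2
    have hidx : (PySem.Dict.getD d b [])[k]'hk = ((j : Nat) : Int) := by
      have h1 : (PySem.Dict.getD d b [])[k]? = some (((0 + j : Nat)) : Int) := by
        rw [hgetD b]; exact hidx?
      rw [List.getElem?_eq_getElem hk] at h1
      simpa using h1
    refine ⟨j, by simpa using hj, hidx, ?_⟩
    have hjb : j < bases.length := by simp [hbases, hj]
    have hbj : bases[j] = b := by simp [hbases, List.getElem_map, hnorm]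
    have htk : (bases.take j).count bases[j] = k := by
      rw [hbj, hbases, ← List.map_take, hcount]
    simp only [hjb, dif_pos]
    rw [pvSpec, htk, pvRender]
    by_cases hkz : k = 0
    · simp [hkz, hbj]
    · have : ((k : Int)) ≠ 0 := by exact_mod_cast hkz
      simp [hkz, hbj]
  obtain ⟨hlen, hget⟩ := pvFill_all
    (fun i => if h : i < bases.length then pvSpec bases i h else "")
    d.items (List.replicate labels.length "") hspec0
  have hlenB : (make_unique_labels_alt labels).length = labels.length := by
    unfold make_unique_labels_alt
    rw [← hd]
    simpa using hlen
  have hlenA : (make_unique_labels labels).length = labels.length := by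
    rw [hA, pvSpecGo_length]; simp [hbases]
  apply List.ext_getElem (by rw [hlenA, hlenB])
  intro i h1 h2
  have hin : i < labels.length := by rw [hlenA] at h1; exact h1
  have hib : i < bases.length := by simp [hbases, hin]
  have hcov : ∃ e ∈ d.items, (i : Int) ∈ e.2 := by
    refine ⟨(pvNorm labels[i], d.getD (pvNorm labels[i]) []), ?_, ?_⟩
    · rw [hitems]
      refine List.mem_map.mpr ⟨pvNorm labels[i], ?_, rfl⟩
      rw [hd, pvBucket_mem_keys]
      right
      exact List.mem_map.mpr ⟨((i : Int), labels[i]),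
        (PySem.List.mem_enumerate_iff _ _ _).mpr ⟨i, hin, by simp⟩, rfl⟩
    · rw [hgetD]
      exact pvIdxs_mem labels _ i hin rfl
  have hBi : (make_unique_labels_alt labels)[i]'h2 = pvSpec bases i hib := by
    have hrep : i < (List.replicate labels.length ("" : String)).length := by simpa using hin
    have hq := hget i hrep
    rw [if_pos hcov] at hq
    have hB? : (make_unique_labels_alt labels)[i]? = (d.items.foldl
        (fun out kv => (PySem.List.enumerate kv.2).foldl
          (fun o q => o.set q.2.toNat
            (if q.1 = 0 then kv.1 else kv.1 ++ "_" ++ PySem.Int.toStr (q.1 + 1))) out)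
        (List.replicate labels.length ""))[i]? := by
      congr 1
    rw [List.getElem?_eq_getElem h2] at hB?
    rw [hq] at hB?
    have := Option.some.inj hB?
    rw [this]
    simp [hib]
  have hAi : (make_unique_labels labels)[i]'h1 = pvSpec bases i hib := by
    have h1' : i < (pvSpecGo [] bases).length := by rw [pvSpecGo_length]; exact hib
    have hA? : (make_unique_labels labels)[i]? = (pvSpecGo [] bases)[i]? := by
      rw [hA]
    rw [List.getElem?_eq_getElem h1, List.getElem?_eq_getElem h1'] at hA?
    have := Option.some.inj hA?
    rw [this, pvSpecGo_getElem bases [] i hib h1']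
    simp [pvSpec]
  rw [hAi, hBi]
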